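-- pv_equiv track=rewrite | github.com/Samtheman2001/Silver-Crow | menu_responses.py | _same_subtype_streak
-- ===== SOURCE A (Python) =====
-- from typing import Any, Callable, Dict, List, Optional, Sequence, Tuple
--
-- def _same_subtype_streak(recent_subtypes: List[str], subtype: str) -> int:
--     n = 0
--     for x in reversed(recent_subtypes or []):
--         if x == subtype:
--             n += 1
--         else:
--             break
--     return n
-- ===== SOURCE B (Python) =====
-- from typing import List
--
-- def _same_subtype_streak(recent_subtypes: List[str], subtype: str) -> int:
--     n = 0
--     for x in (recent_subtypes or []):
--         n = n + 1 if x == subtype else 0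
--     return n
-- ===== Notes on version B (the rewrite author's own statement) =====
-- stated objective: alternative
-- what changed: Replaced the reversed-iteration with an early break by a single forward pass with a reset-on-mismatch counter whose final value is the trailing streak length.
import Mathlib
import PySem

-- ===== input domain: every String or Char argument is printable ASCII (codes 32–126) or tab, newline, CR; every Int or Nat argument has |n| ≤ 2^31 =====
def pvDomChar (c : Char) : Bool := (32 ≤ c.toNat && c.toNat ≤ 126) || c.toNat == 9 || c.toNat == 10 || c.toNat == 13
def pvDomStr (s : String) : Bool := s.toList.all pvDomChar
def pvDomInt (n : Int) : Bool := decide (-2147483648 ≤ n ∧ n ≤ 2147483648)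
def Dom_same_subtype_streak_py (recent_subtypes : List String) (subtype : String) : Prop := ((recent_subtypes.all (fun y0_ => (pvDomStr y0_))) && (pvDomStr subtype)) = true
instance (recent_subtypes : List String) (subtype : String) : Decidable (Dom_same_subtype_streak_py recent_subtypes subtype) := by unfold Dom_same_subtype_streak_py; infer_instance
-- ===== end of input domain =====

-- B replaces A's reversed walk with early break by a forward reset-counter pass; same value, no speed claim.

-- ===== PORT A =====
-- A's loop over reversed(recent_subtypes or []): count while equal, break at first mismatch.
def pvStreakRev (subtype : String) : List String → Int
  | [] => 0
  | x :: rest => if x = subtype then 1 + pvStreakRev subtype rest else 0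

def same_subtype_streak_py (recent_subtypes : List String) (subtype : String) : Int :=
  pvStreakRev subtype recent_subtypes.reverse

-- ===== PORT B =====
def same_subtype_streak_py_alt (recent_subtypes : List String) (subtype : String) : Int :=
  recent_subtypes.foldl (fun n x => if x = subtype then n + 1 else 0) 0

-- ===== PRECONDITION & SPEC =====
def Spec_same_subtype_streak_py (recent_subtypes : List String) (subtype : String) (out : Int) : Prop := out = same_subtype_streak_py_alt recent_subtypes subtype
instance (recent_subtypes : List String) (subtype : String) (out : Int) : Decidable (Spec_same_subtype_streak_py recent_subtypes subtype out) := by unfold Spec_same_subtype_streak_py; infer_instance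

-- ===== CLAIM (what is proved, stated in full; the proofs are below) =====
def Claim_equal_same_subtype_streak_py : Prop := ∀ (recent_subtypes : List String) (subtype : String), Dom_same_subtype_streak_py recent_subtypes subtype → Spec_same_subtype_streak_py recent_subtypes subtype (same_subtype_streak_py recent_subtypes subtype)

-- ===== LEMMAS AND PROOFS =====
theorem pvStreak_eq_foldl (subtype : String) (l : List String) :
    pvStreakRev subtype l.reverse
      = l.foldl (fun n x => if x = subtype then n + 1 else 0) 0 := by
  induction l using List.reverseRecOn with
  | nil => rfl
  | append_singleton l x ih =>
    simp only [List.reverse_append, List.reverse_singleton, List.singleton_append,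
      List.foldl_append, List.foldl_cons, List.foldl_nil, pvStreakRev]
    split <;> simp [ih] <;> omega

-- ===== VERDICT (by name: the statement is the Claim_ definition above) =====
theorem same_subtype_streak_py_spec : Claim_equal_same_subtype_streak_py := by
  intro l s _
  unfold Spec_same_subtype_streak_py same_subtype_streak_py same_subtype_streak_py_alt
  exact pvStreak_eq_foldl s l
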